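-- pv_equiv track=rewrite | github.com/Ilan-Goren/ASEProject | polysphere/bitmap_transformations.py | generate_transformations
-- ===== SOURCE A (Python) =====
-- def rotate_right(bitmap, width, height):
--     """Rotate a rectangular bitmap 90 degrees clockwise."""
--     new_bitmap = 0
--     for row in range(height):
--         for col in range(width):
--             # Move the bit at (row, col) to (col, height - row - 1) in the rotated bitmap
--             if bitmap & (1 << (row * width + col)):
--                 new_bitmap |= 1 << (col * height + (height - row - 1))
--     return new_bitmap
--
-- def flip_horizontal(bitmap, width, height):
--     """Flip a rectangular bitmap horizontally."""
--     new_bitmap = 0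
--     for row in range(height):
--         for col in range(width):
--             if bitmap & (1 << (row * width + col)):
--                 # Flip horizontally (reverse the column position)
--                 new_bitmap |= 1 << (row * width + (width - col - 1))
--     return new_bitmap
--
-- def generate_transformations(piece_bitmap, width, height):
--     """Generate all unique rotations and flips of a polyomino represented by its bitmap."""
--     transformations = set()
--
--     # Add all rotations of the original piece
--     current_bitmap = piece_bitmap
--     for _ in range(4):
--         transformations.add((current_bitmap, width, height))
--         # Rotate 90 degrees clockwise
--         current_bitmap = rotate_right(current_bitmap, width, height)
--         width, height = height, width  # Swap width and height after each 90-degree rotation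
--
--     # Flip the piece horizontally
--     flipped_bitmap = flip_horizontal(piece_bitmap, width, height)
--
--     # Add all rotations of the horizontally flipped piece
--     for _ in range(4):
--         transformations.add((flipped_bitmap, width, height))
--         # Rotate 90 degrees clockwise
--         flipped_bitmap = rotate_right(flipped_bitmap, width, height)
--         width, height = height, width  # Swap width and height after each 90-degree rotation
--
--     return list(transformations)
-- ===== SOURCE B (Python) =====
-- def generate_transformations(piece_bitmap, width, height):
--     """Generate all unique rotations and flips of a polyomino represented by its bitmap.
--
--     Decodes the bitmap once into cell coordinates, then applies each of the eight
--     dihedral symmetries as a direct coordinate map and re-encodes it, instead of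
--     rotating the previous result repeatedly."""
--     w, h = width, height
--     cells = [(r, c) for r in range(h) for c in range(w)
--              if piece_bitmap & (1 << (r * w + c))]
--
--     def enc(m):
--         v = 0
--         for r, c in cells:
--             v |= 1 << m(r, c)
--         return v
--
--     candidates = [
--         (piece_bitmap, w, h),                                  # identity (kept verbatim)
--         (enc(lambda r, c: c * h + (h - 1 - r)), h, w),         # rot 90 cw
--         (enc(lambda r, c: (h - 1 - r) * w + (w - 1 - c)), w, h),  # rot 180
--         (enc(lambda r, c: (w - 1 - c) * h + r), h, w),         # rot 270
--         (enc(lambda r, c: r * w + (w - 1 - c)), w, h),         # horizontal flip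
--         (enc(lambda r, c: (w - 1 - c) * h + (h - 1 - r)), h, w),  # flip + rot 90
--         (enc(lambda r, c: (h - 1 - r) * w + c), w, h),         # flip + rot 180
--         (enc(lambda r, c: c * h + r), h, w),                   # flip + rot 270
--     ]
--     return list(set(candidates))
-- ===== Notes on version B (the rewrite author's own statement) =====
-- stated objective: alternative
-- what changed: B decodes the bitmap once into a list of set-cell coordinates and produces each of the eight dihedral transforms by a direct coordinate map re-encoded with ORs, instead of A's iterative rotate-the-previous-result chain of full-rectangle rescans.
import Mathlib
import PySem

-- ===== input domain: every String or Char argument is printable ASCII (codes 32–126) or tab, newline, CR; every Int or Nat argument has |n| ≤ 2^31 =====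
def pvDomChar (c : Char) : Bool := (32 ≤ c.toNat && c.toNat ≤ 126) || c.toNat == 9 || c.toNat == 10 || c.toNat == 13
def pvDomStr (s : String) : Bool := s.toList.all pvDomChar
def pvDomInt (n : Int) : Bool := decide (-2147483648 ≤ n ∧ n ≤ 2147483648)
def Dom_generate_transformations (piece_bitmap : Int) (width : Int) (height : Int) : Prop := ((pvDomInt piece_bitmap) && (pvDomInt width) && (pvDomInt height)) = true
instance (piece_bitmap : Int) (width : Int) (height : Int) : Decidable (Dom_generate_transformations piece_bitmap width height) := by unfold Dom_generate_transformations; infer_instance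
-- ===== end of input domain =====

-- B decodes the bitmap once into cell coordinates and applies each of the eight dihedral
-- symmetries as a direct coordinate map (instead of rotating the previous result repeatedly);
-- objective: alternative (structurally different, same asymptotic cost).

-- ===== PORT A =====
-- Python's loop indices range(height)/range(width) are the nonnegative ints 0..h-1; they are
-- ported as Nats (exact: every shift count below is nonnegative, and height - row - 1 ≥ 0).
def rotate_right (bitmap : Int) (width : Int) (height : Int) : Int :=
  (List.range height.toNat).foldl (fun nb row =>
    (List.range width.toNat).foldl (fun nb col =>
      if PySem.Int.band bitmap ((1:Int) <<< (row * width.toNat + col)) ≠ 0 then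
        PySem.Int.bor nb ((1:Int) <<< (col * height.toNat + (height.toNat - row - 1)))
      else nb) nb) 0

def flip_horizontal (bitmap : Int) (width : Int) (height : Int) : Int :=
  (List.range height.toNat).foldl (fun nb row =>
    (List.range width.toNat).foldl (fun nb col =>
      if PySem.Int.band bitmap ((1:Int) <<< (row * width.toNat + col)) ≠ 0 then
        PySem.Int.bor nb ((1:Int) <<< (row * width.toNat + (width.toNat - col - 1)))
      else nb) nb) 0

def generate_transformations (piece_bitmap : Int) (width : Int) (height : Int) : List (Int × Int × Int) :=
  -- state of each Python loop: (transformations, current_bitmap, width, height)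
  let st1 := (List.range 4).foldl
    (fun (st : PySem.Set (Int × Int × Int) × Int × Int × Int) _ =>
      (PySem.Set.add st.1 (st.2.1, st.2.2.1, st.2.2.2),
       rotate_right st.2.1 st.2.2.1 st.2.2.2, st.2.2.2, st.2.2.1))
    (PySem.Set.empty, piece_bitmap, width, height)
  let flipped := flip_horizontal piece_bitmap st1.2.2.1 st1.2.2.2
  let st2 := (List.range 4).foldl
    (fun (st : PySem.Set (Int × Int × Int) × Int × Int × Int) _ =>
      (PySem.Set.add st.1 (st.2.1, st.2.2.1, st.2.2.2),
       rotate_right st.2.1 st.2.2.1 st.2.2.2, st.2.2.2, st.2.2.1))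
    (st1.1, flipped, st1.2.2.1, st1.2.2.2)
  st2.1

-- ===== PORT B =====
-- the comprehension [(r, c) for r in range(h) for c in range(w) if piece_bitmap & (1 << (r*w+c))]
def gtAltCells (piece_bitmap : Int) (w : Int) (h : Int) : List (Nat × Nat) :=
  (List.range h.toNat).flatMap (fun r =>
    (List.range w.toNat).filterMap (fun c =>
      if PySem.Int.band piece_bitmap ((1:Int) <<< (r * w.toNat + c)) ≠ 0 then some (r, c) else none))

-- enc(m): OR together 1 << m(r, c) over the decoded cells
def gtAltEnc (cells : List (Nat × Nat)) (m : Nat → Nat → Nat) : Int :=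
  cells.foldl (fun v p => PySem.Int.bor v ((1:Int) <<< m p.1 p.2)) 0

def generate_transformations_alt (piece_bitmap : Int) (width : Int) (height : Int) : List (Int × Int × Int) :=
  let w := width
  let h := height
  let W := width.toNat
  let H := height.toNat
  let cells := gtAltCells piece_bitmap w h
  let candidates : List (Int × Int × Int) :=
    [ (piece_bitmap, w, h),                                        -- identity (kept verbatim)
      (gtAltEnc cells (fun r c => c * H + (H - 1 - r)), h, w),     -- rot 90 cw
      (gtAltEnc cells (fun r c => (H - 1 - r) * W + (W - 1 - c)), w, h),  -- rot 180
      (gtAltEnc cells (fun r c => (W - 1 - c) * H + r), h, w),     -- rot 270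
      (gtAltEnc cells (fun r c => r * W + (W - 1 - c)), w, h),     -- horizontal flip
      (gtAltEnc cells (fun r c => (W - 1 - c) * H + (H - 1 - r)), h, w),  -- flip + rot 90
      (gtAltEnc cells (fun r c => (H - 1 - r) * W + c), w, h),     -- flip + rot 180
      (gtAltEnc cells (fun r c => c * H + r), h, w) ]              -- flip + rot 270
  PySem.Set.ofList candidates

-- ===== PRECONDITION & SPEC =====
def Spec_generate_transformations (piece_bitmap : Int) (width : Int) (height : Int) (out : List (Int × Int × Int)) : Prop := out = generate_transformations_alt piece_bitmap width height
instance (piece_bitmap : Int) (width : Int) (height : Int) (out : List (Int × Int × Int)) : Decidable (Spec_generate_transformations piece_bitmap width height out) := by unfold Spec_generate_transformations; infer_instance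

-- ===== CLAIM (what is proved, stated in full; the proofs are below) =====
def Claim_equal_generate_transformations : Prop := ∀ (piece_bitmap : Int) (width : Int) (height : Int), Dom_generate_transformations piece_bitmap width height → Spec_generate_transformations piece_bitmap width height (generate_transformations piece_bitmap width height)

-- ===== LEMMAS AND PROOFS =====

-- the OR of 2^j over a list of bit positions, at the Nat level
def orEncN (js : List Nat) : Nat := js.foldl (fun v j => v ||| (1 <<< j)) 0

-- row-major coordinates of a H-rows × W-cols rectangle
def rectCells (W H : Nat) : List (Nat × Nat) := (List.range H).product (List.range W)

-- the set cells of bitmap b inside the rectangle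
def bitsOf (b : Int) (W H : Nat) : List (Nat × Nat) :=
  (rectCells W H).filter (fun p => b.testBit (p.1 * W + p.2))

theorem band_one_shift_ne (b : Int) (k : Nat) :
    (PySem.Int.band b ((1:Int) <<< k) ≠ 0) ↔ b.testBit k = true := by
  have hpow : (1:Int) <<< k = ((2 ^ k : Nat) : Int) := by
    show ((1 <<< k : Nat) : Int) = _
    rw [Nat.shiftLeft_eq, one_mul]
  have hk : 0 < 2 ^ k := Nat.two_pow_pos k
  cases b with
  | ofNat m =>
      rw [hpow, show (Int.ofNat m) = ((m : Nat) : Int) from rfl,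
        PySem.Int.band_natCast]
      rw [Nat.and_two_pow]
      cases h : m.testBit k <;>
        simp [show ((m : Nat) : Int).testBit k = m.testBit k from rfl, h]
  | negSucc m =>
      rw [hpow]
      have h1 : ¬ (0:Int) ≤ Int.negSucc m := by
        rw [Int.negSucc_eq]; omega
      have h2 : (0:Int) ≤ ((2 ^ k : Nat) : Int) := by positivity
      rw [PySem.Int.band]
      rw [if_neg h1, if_pos h2]
      have h3 : (-(Int.negSucc m) - 1).toNat = m := by
        rw [Int.negSucc_eq]; omega
      rw [h3, Int.toNat_natCast]
      rw [Nat.and_comm, Nat.and_two_pow]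
      rw [show (Int.negSucc m).testBit k = !m.testBit k from rfl]
      cases h : m.testBit k <;> simp

theorem foldl_bor_cast (js : List Nat) (a : Nat) :
    js.foldl (fun (v : Int) (j : Nat) => PySem.Int.bor v ((1:Int) <<< j)) ((a : Nat) : Int)
      = ((js.foldl (fun v j => v ||| (1 <<< j)) a : Nat) : Int) := by
  induction js generalizing a with
  | nil => rfl
  | cons j js ih =>
      simp only [List.foldl_cons]
      rw [show (1:Int) <<< j = ((1 <<< j : Nat) : Int) from rfl, PySem.Int.bor_natCast, ih]

theorem testBit_foldl_or (js : List Nat) (a : Nat) (k : Nat) :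
    (js.foldl (fun v j => v ||| (1 <<< j)) a).testBit k = true ↔
      a.testBit k = true ∨ k ∈ js := by
  induction js generalizing a with
  | nil => simp
  | cons j js ih =>
      simp only [List.foldl_cons, List.mem_cons]
      rw [ih]
      have : (a ||| (1 <<< j)).testBit k = (a.testBit k || decide (j = k)) := by
        rw [Nat.testBit_lor, Nat.shiftLeft_eq, one_mul, Nat.testBit_two_pow]
      rw [this]
      simp only [Bool.or_eq_true, decide_eq_true_eq]
      constructor
      · rintro ((h | h) | h)
        · exact Or.inl h
        · exact Or.inr (Or.inl h.symm)
        · exact Or.inr (Or.inr h)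
      · rintro (h | h | h)
        · exact Or.inl (Or.inl h)
        · exact Or.inl (Or.inr h.symm)
        · exact Or.inr h

theorem testBit_orEncN (js : List Nat) (k : Nat) :
    (orEncN js).testBit k = true ↔ k ∈ js := by
  rw [orEncN, testBit_foldl_or]
  simp

theorem orEncN_perm {js ks : List Nat} (h : js.Perm ks) : orEncN js = orEncN ks := by
  unfold orEncN
  exact h.foldl_eq'
    (fun x _ y _ z => by
      rw [Nat.lor_assoc, Nat.lor_assoc, Nat.lor_comm (1 <<< x)]) 0

theorem mem_rectCells (W H : Nat) (p : Nat × Nat) :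
    p ∈ rectCells W H ↔ p.1 < H ∧ p.2 < W := by
  obtain ⟨r, c⟩ := p
  rw [rectCells]
  rw [List.pair_mem_product]
  simp [List.mem_range]

theorem nodup_rectCells (W H : Nat) : (rectCells W H).Nodup :=
  List.Nodup.product List.nodup_range List.nodup_range

theorem nodup_bitsOf (b : Int) (W H : Nat) : (bitsOf b W H).Nodup :=
  List.Nodup.filter _ (nodup_rectCells W H)

theorem mem_bitsOf (b : Int) (W H : Nat) (p : Nat × Nat) :
    p ∈ bitsOf b W H ↔ (p.1 < H ∧ p.2 < W) ∧ b.testBit (p.1 * W + p.2) = true := by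
  rw [bitsOf, List.mem_filter, mem_rectCells]

-- unique decomposition of a bit index in a rectangle
theorem rc_unique {W a b c d : Nat} (hb : b < W) (hd : d < W)
    (h : a * W + b = c * W + d) : a = c ∧ b = d := by
  have hW : 0 < W := Nat.lt_of_le_of_lt (Nat.zero_le _) hb
  have ha : (a * W + b) / W = a := by
    rw [Nat.mul_comm a W, Nat.mul_add_div hW, Nat.div_eq_of_lt hb, Nat.add_zero]
  have hc : (c * W + d) / W = c := by
    rw [Nat.mul_comm c W, Nat.mul_add_div hW, Nat.div_eq_of_lt hd, Nat.add_zero]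
  have : a = c := by rw [← ha, ← hc, h]
  refine ⟨this, ?_⟩
  subst this
  omega

theorem foldl_congr'' {α β : Type} {l : List α} {f g : β → α → β} {i : β}
    (h : ∀ b, ∀ a ∈ l, f b a = g b a) : l.foldl f i = l.foldl g i := by
  induction l generalizing i with
  | nil => rfl
  | cons x xs ih => rw [List.foldl_cons, List.foldl_cons, h, ih (fun b a ha => h b a (List.mem_cons_of_mem _ ha))]
                    exact List.mem_cons_self ..

-- A's double loop, reduced to orEncN over the filtered rectangle
theorem loop_shape (b : Int) (W H : Nat) (g : Nat × Nat → Nat) :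
    (List.range H).foldl (fun nb row =>
      (List.range W).foldl (fun nb col =>
        if PySem.Int.band b ((1:Int) <<< (row * W + col)) ≠ 0 then
          PySem.Int.bor nb ((1:Int) <<< g (row, col))
        else nb) nb) 0
    = ((orEncN ((bitsOf b W H).map g) : Nat) : Int) := by
  have h1 :
      (List.range H).foldl (fun nb row =>
        (List.range W).foldl (fun nb col =>
          if PySem.Int.band b ((1:Int) <<< (row * W + col)) ≠ 0 then
            PySem.Int.bor nb ((1:Int) <<< g (row, col))
          else nb) nb) (0 : Int)
      = (rectCells W H).foldl (fun nb p =>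
          if PySem.Int.band b ((1:Int) <<< (p.1 * W + p.2)) ≠ 0 then
            PySem.Int.bor nb ((1:Int) <<< g p)
          else nb) (0 : Int) := by
    rw [rectCells, List.product, List.foldl_flatMap]
    apply foldl_congr''
    intro acc r _
    rw [List.foldl_map]
  have h2 : (rectCells W H).foldl (fun nb p =>
        if PySem.Int.band b ((1:Int) <<< (p.1 * W + p.2)) ≠ 0 then
          PySem.Int.bor nb ((1:Int) <<< g p)
        else nb) (0 : Int)
      = (bitsOf b W H).foldl (fun nb p => PySem.Int.bor nb ((1:Int) <<< g p)) (0 : Int) := by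
    rw [bitsOf, List.foldl_filter]
    apply foldl_congr''
    intro acc p _
    by_cases h : PySem.Int.band b ((1:Int) <<< (p.1 * W + p.2)) ≠ 0
    · rw [if_pos h, if_pos (by simpa using (band_one_shift_ne b _).mp h)]
    · rw [if_neg h, if_neg (by simpa using fun hc => h ((band_one_shift_ne b _).mpr hc))]
  have h3 : (bitsOf b W H).foldl (fun nb p => PySem.Int.bor nb ((1:Int) <<< g p)) (0 : Int)
      = ((bitsOf b W H).map g).foldl
          (fun (v : Int) (j : Nat) => PySem.Int.bor v ((1:Int) <<< j)) (0 : Int) :=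
    (List.foldl_map (f := g)
      (g := fun (v : Int) (j : Nat) => PySem.Int.bor v ((1:Int) <<< j))).symm
  rw [h1, h2, h3, show ((0:Int)) = (((0:Nat) : Nat) : Int) from rfl, foldl_bor_cast]
  rfl

theorem rot_eq (b : Int) (w h : Int) :
    rotate_right b w h
      = ((orEncN ((bitsOf b w.toNat h.toNat).map
          (fun p => p.2 * h.toNat + (h.toNat - p.1 - 1))) : Nat) : Int) := by
  exact loop_shape b w.toNat h.toNat (fun p => p.2 * h.toNat + (h.toNat - p.1 - 1))

theorem flip_eq (b : Int) (w h : Int) :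
    flip_horizontal b w h
      = ((orEncN ((bitsOf b w.toNat h.toNat).map
          (fun p => p.1 * w.toNat + (w.toNat - p.2 - 1))) : Nat) : Int) := by
  exact loop_shape b w.toNat h.toNat (fun p => p.1 * w.toNat + (w.toNat - p.2 - 1))

-- rotating a bitmap given in encoded coordinate form: the coordinates rotate
theorem rot_encoded (L : List (Nat × Nat)) (hnd : L.Nodup) (w' h' : Int)
    (τ : Nat × Nat → Nat × Nat)
    (hin : ∀ p ∈ L, (τ p).1 < h'.toNat ∧ (τ p).2 < w'.toNat)
    (hinj : ∀ p ∈ L, ∀ q ∈ L, τ p = τ q → p = q) :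
    rotate_right ((orEncN (L.map (fun p => (τ p).1 * w'.toNat + (τ p).2)) : Nat) : Int) w' h'
      = ((orEncN (L.map (fun p => (τ p).2 * h'.toNat + (h'.toNat - (τ p).1 - 1))) : Nat) : Int) := by
  set W' := w'.toNat
  set H' := h'.toNat
  set x : Int := ((orEncN (L.map (fun p => (τ p).1 * W' + (τ p).2)) : Nat) : Int)
  have hx : ∀ k, x.testBit k = true ↔ k ∈ L.map (fun p => (τ p).1 * W' + (τ p).2) := by
    intro k
    show (Int.ofNat _).testBit k = true ↔ _
    rw [show (Int.ofNat (orEncN (L.map (fun p => (τ p).1 * W' + (τ p).2)))).testBit k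
          = (orEncN (L.map (fun p => (τ p).1 * W' + (τ p).2))).testBit k from rfl]
    exact testBit_orEncN _ k
  have hperm : (bitsOf x W' H').Perm (L.map τ) := by
    apply List.perm_of_nodup_nodup_toFinset_eq (nodup_bitsOf _ _ _)
      (List.Nodup.map_on hinj hnd)
    apply Finset.ext
    intro q
    rw [List.mem_toFinset, List.mem_toFinset, mem_bitsOf, hx, List.mem_map, List.mem_map]
    constructor
    · rintro ⟨⟨hq1, hq2⟩, p, hp, hidx⟩
      refine ⟨p, hp, ?_⟩
      have hb := (hin p hp).2
      obtain ⟨h1, h2⟩ := rc_unique hb hq2 hidx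
      obtain ⟨q1, q2⟩ := q
      simp_all [Prod.ext_iff]
    · rintro ⟨p, hp, rfl⟩
      exact ⟨⟨(hin p hp).1, (hin p hp).2⟩, ⟨p, hp, rfl⟩⟩
  rw [rot_eq, orEncN_perm (hperm.map (fun q => q.2 * H' + (H' - q.1 - 1))), List.map_map]
  rfl

-- B's cells are exactly bitsOf
theorem cells_eq (b : Int) (w h : Int) :
    gtAltCells b w h = bitsOf b w.toNat h.toNat := by
  rw [gtAltCells, bitsOf, rectCells, List.product, List.filter_flatMap]
  apply List.flatMap_congr
  intro r _
  rw [List.filter_map]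
  induction List.range w.toNat with
  | nil => rfl
  | cons c cs ih =>
      simp only [List.filterMap_cons, List.filter_cons, Function.comp]
      by_cases hc : PySem.Int.band b ((1:Int) <<< (r * w.toNat + c)) ≠ 0
      · rw [if_pos hc]
        have : b.testBit (r * w.toNat + c) = true := (band_one_shift_ne b _).mp hc
        simp only [this, if_true, List.map_cons]
        rw [ih]
      · rw [if_neg hc]
        have : ¬ b.testBit (r * w.toNat + c) = true := fun hh => hc ((band_one_shift_ne b _).mpr hh)
        simp only [this]
        simpa using ih

theorem enc_eq (cells : List (Nat × Nat)) (m : Nat → Nat → Nat) :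
    gtAltEnc cells m = ((orEncN (cells.map (fun p => m p.1 p.2)) : Nat) : Int) := by
  have h := foldl_bor_cast (cells.map (fun p => m p.1 p.2)) 0
  rw [List.foldl_map] at h
  rw [gtAltEnc, show ((0:Int)) = (((0:Nat) : Nat) : Int) from rfl, h]
  rfl

-- ===== VERDICT (by name: the statement is the Claim_ definition above) =====
set_option maxHeartbeats 2000000 in
theorem generate_transformations_spec : Claim_equal_generate_transformations := by
  intro piece_bitmap width height _
  unfold Spec_generate_transformations
  have hmem : ∀ p ∈ bitsOf piece_bitmap width.toNat height.toNat,
      p.1 < height.toNat ∧ p.2 < width.toNat :=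
    fun p hp => ((mem_bitsOf _ _ _ p).mp hp).1
  have hnd : (bitsOf piece_bitmap width.toNat height.toNat).Nodup := nodup_bitsOf _ _ _
  -- abbreviations
  let L := bitsOf piece_bitmap width.toNat height.toNat
  -- A's chain of rotations, in encoded-coordinate form
  have hA1 : rotate_right piece_bitmap width height
      = ((orEncN (L.map (fun p => p.2 * height.toNat + (height.toNat - p.1 - 1))) : Nat) : Int) :=
    rot_eq piece_bitmap width height
  have hA2 : rotate_right ((orEncN (L.map (fun p => p.2 * height.toNat + (height.toNat - p.1 - 1))) : Nat) : Int) height width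
      = ((orEncN (L.map (fun p => (height.toNat - p.1 - 1) * width.toNat + (width.toNat - p.2 - 1))) : Nat) : Int) := by
    have := rot_encoded L hnd height width (fun p => (p.2, height.toNat - p.1 - 1))
      (fun p hp => by have := hmem p hp; dsimp only; omega)
      (fun p hp q hq h => by
        have h1 := hmem p hp; have h2 := hmem q hq
        have e1 := congrArg Prod.fst h
        have e2 := congrArg Prod.snd h
        dsimp only at e1 e2
        exact Prod.ext (by omega) (by omega))
    exact this
  have hA3 : rotate_right ((orEncN (L.map (fun p => (height.toNat - p.1 - 1) * width.toNat + (width.toNat - p.2 - 1))) : Nat) : Int) width height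
      = ((orEncN (L.map (fun p => (width.toNat - p.2 - 1) * height.toNat + (height.toNat - (height.toNat - p.1 - 1) - 1))) : Nat) : Int) := by
    have := rot_encoded L hnd width height (fun p => (height.toNat - p.1 - 1, width.toNat - p.2 - 1))
      (fun p hp => by have := hmem p hp; dsimp only; omega)
      (fun p hp q hq h => by
        have h1 := hmem p hp; have h2 := hmem q hq
        have e1 := congrArg Prod.fst h
        have e2 := congrArg Prod.snd h
        dsimp only at e1 e2
        exact Prod.ext (by omega) (by omega))
    exact this
  have hF0 : flip_horizontal piece_bitmap width height
      = ((orEncN (L.map (fun p => p.1 * width.toNat + (width.toNat - p.2 - 1))) : Nat) : Int) :=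
    flip_eq piece_bitmap width height
  have hF1 : rotate_right ((orEncN (L.map (fun p => p.1 * width.toNat + (width.toNat - p.2 - 1))) : Nat) : Int) width height
      = ((orEncN (L.map (fun p => (width.toNat - p.2 - 1) * height.toNat + (height.toNat - p.1 - 1))) : Nat) : Int) := by
    have := rot_encoded L hnd width height (fun p => (p.1, width.toNat - p.2 - 1))
      (fun p hp => by have := hmem p hp; dsimp only; omega)
      (fun p hp q hq h => by
        have h1 := hmem p hp; have h2 := hmem q hq
        have e1 := congrArg Prod.fst h
        have e2 := congrArg Prod.snd h
        dsimp only at e1 e2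
        exact Prod.ext (by omega) (by omega))
    exact this
  have hF2 : rotate_right ((orEncN (L.map (fun p => (width.toNat - p.2 - 1) * height.toNat + (height.toNat - p.1 - 1))) : Nat) : Int) height width
      = ((orEncN (L.map (fun p => (height.toNat - p.1 - 1) * width.toNat + (width.toNat - (width.toNat - p.2 - 1) - 1))) : Nat) : Int) := by
    have := rot_encoded L hnd height width (fun p => (width.toNat - p.2 - 1, height.toNat - p.1 - 1))
      (fun p hp => by have := hmem p hp; dsimp only; omega)
      (fun p hp q hq h => by
        have h1 := hmem p hp; have h2 := hmem q hq
        have e1 := congrArg Prod.fst h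
        have e2 := congrArg Prod.snd h
        dsimp only at e1 e2
        exact Prod.ext (by omega) (by omega))
    exact this
  have hF3 : rotate_right ((orEncN (L.map (fun p => (height.toNat - p.1 - 1) * width.toNat + (width.toNat - (width.toNat - p.2 - 1) - 1))) : Nat) : Int) width height
      = ((orEncN (L.map (fun p => (width.toNat - (width.toNat - p.2 - 1) - 1) * height.toNat + (height.toNat - (height.toNat - p.1 - 1) - 1))) : Nat) : Int) := by
    have := rot_encoded L hnd width height
      (fun p => (height.toNat - p.1 - 1, width.toNat - (width.toNat - p.2 - 1) - 1))
      (fun p hp => by have := hmem p hp; dsimp only; omega)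
      (fun p hp q hq h => by
        have h1 := hmem p hp; have h2 := hmem q hq
        have e1 := congrArg Prod.fst h
        have e2 := congrArg Prod.snd h
        dsimp only at e1 e2
        exact Prod.ext (by omega) (by omega))
    exact this
  -- B's candidates, in the same encoded-coordinate form
  have hB : ∀ (m : Nat → Nat → Nat) (f : Nat × Nat → Nat),
      (∀ p ∈ L, m p.1 p.2 = f p) →
      gtAltEnc (gtAltCells piece_bitmap width height) m = ((orEncN (L.map f) : Nat) : Int) := by
    intro m f hmf
    rw [cells_eq, enc_eq]
    exact congrArg _ (congrArg orEncN (List.map_congr_left hmf))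
  have hB1 := hB (fun r c => c * height.toNat + (height.toNat - 1 - r))
      (fun p => p.2 * height.toNat + (height.toNat - p.1 - 1)) (fun p hp => by
        have h1 := hmem p hp
        dsimp only
        try simp only [Nat.sub_sub, Nat.add_comm])
  have hB2 := hB (fun r c => (height.toNat - 1 - r) * width.toNat + (width.toNat - 1 - c))
      (fun p => (height.toNat - p.1 - 1) * width.toNat + (width.toNat - p.2 - 1)) (fun p hp => by
        have h1 := hmem p hp
        dsimp only
        try simp only [Nat.sub_sub, Nat.add_comm])
  have hB3 := hB (fun r c => (width.toNat - 1 - c) * height.toNat + r)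
      (fun p => (width.toNat - p.2 - 1) * height.toNat + (height.toNat - (height.toNat - p.1 - 1) - 1))
      (fun p hp => by
        have h1 := hmem p hp
        dsimp only
        try simp only [show height.toNat - (height.toNat - p.1 - 1) - 1 = p.1 from by omega]
        try simp only [Nat.sub_sub, Nat.add_comm])
  have hB4 := hB (fun r c => r * width.toNat + (width.toNat - 1 - c))
      (fun p => p.1 * width.toNat + (width.toNat - p.2 - 1)) (fun p hp => by
        have h1 := hmem p hp
        dsimp only
        try simp only [Nat.sub_sub, Nat.add_comm])
  have hB5 := hB (fun r c => (width.toNat - 1 - c) * height.toNat + (height.toNat - 1 - r))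
      (fun p => (width.toNat - p.2 - 1) * height.toNat + (height.toNat - p.1 - 1)) (fun p hp => by
        have h1 := hmem p hp
        dsimp only
        try simp only [Nat.sub_sub, Nat.add_comm])
  have hB6 := hB (fun r c => (height.toNat - 1 - r) * width.toNat + c)
      (fun p => (height.toNat - p.1 - 1) * width.toNat + (width.toNat - (width.toNat - p.2 - 1) - 1))
      (fun p hp => by
        have h1 := hmem p hp
        dsimp only
        try simp only [show width.toNat - (width.toNat - p.2 - 1) - 1 = p.2 from by omega]
        try simp only [Nat.sub_sub, Nat.add_comm])
  have hB7 := hB (fun r c => c * height.toNat + r)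
      (fun p => (width.toNat - (width.toNat - p.2 - 1) - 1) * height.toNat + (height.toNat - (height.toNat - p.1 - 1) - 1))
      (fun p hp => by
        have h1 := hmem p hp
        dsimp only
        try simp only [show width.toNat - (width.toNat - p.2 - 1) - 1 = p.2 from by omega,
          show height.toNat - (height.toNat - p.1 - 1) - 1 = p.1 from by omega]
        try simp only [Nat.sub_sub, Nat.add_comm])
  unfold generate_transformations generate_transformations_alt
  simp only [show List.range 4 = [0, 1, 2, 3] from rfl, List.foldl_cons, List.foldl_nil]
  rw [hB1, hB2, hB3, hB4, hB5, hB6, hB7]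
  rw [hA1, hA2, hA3, hF0, hF1, hF2, hF3]
  rfl
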